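-- pv_equiv track=rewrite | github.com/johnschekin/Agent | scripts/bulk_family_linker.py | _family_ancestors
-- ===== SOURCE A (Python) =====
-- def _family_ancestors(family_id: str) -> list[str]:
--     """Return nearest-to-root ancestors for dotted family IDs."""
--     parts = [p for p in str(family_id or "").split(".") if p]
--     if len(parts) <= 1:
--         return []
--     ancestors: list[str] = []
--     for i in range(len(parts) - 1, 0, -1):
--         ancestors.append(".".join(parts[:i]))
--     return ancestors
-- ===== SOURCE B (Python) =====
-- def _family_ancestors(family_id: str) -> list[str]:
--     """Return nearest-to-root ancestors for dotted family IDs."""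
--     parts = [p for p in str(family_id or "").split(".") if p]
--     if len(parts) <= 1:
--         return []
--     acc = parts[0]
--     prefixes = [acc]
--     for part in parts[1:-1]:
--         acc = acc + "." + part
--         prefixes.append(acc)
--     return prefixes[::-1]
-- ===== Notes on version B (the rewrite author's own statement) =====
-- stated objective: faster
-- what changed: Replaced the backward index loop that re-slices parts[:i] and re-joins each prefix from scratch with a forward pass maintaining one running dotted-string accumulator, appending each grown prefix and reversing the list once at the end.
import Mathlib
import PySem

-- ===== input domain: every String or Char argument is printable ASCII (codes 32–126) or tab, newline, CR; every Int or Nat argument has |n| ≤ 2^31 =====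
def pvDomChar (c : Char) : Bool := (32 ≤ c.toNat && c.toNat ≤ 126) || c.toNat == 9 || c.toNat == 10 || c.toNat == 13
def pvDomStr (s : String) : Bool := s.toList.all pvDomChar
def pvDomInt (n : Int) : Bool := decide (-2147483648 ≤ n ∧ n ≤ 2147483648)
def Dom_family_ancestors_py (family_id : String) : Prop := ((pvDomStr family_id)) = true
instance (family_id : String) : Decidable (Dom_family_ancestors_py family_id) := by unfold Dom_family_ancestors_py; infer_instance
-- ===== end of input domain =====

-- B replaces A's backward loop that re-slices and re-joins each prefix by a forward running-string
-- accumulator plus one final reversal (objective: faster — no repeated joins of growing prefixes).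

-- ===== PORT A =====
-- str(family_id or "") is the identity on a str argument, so parts is the list of non-empty split pieces.
def family_ancestors_py (family_id : String) : List String :=
  let parts : List String :=
    ((PySem.Str.split? family_id ".").getD []).filter (fun p => !(p == ""))
  if parts.length ≤ 1 then []
  else
    (PySem.List.pyRange ((parts.length : Int) - 1) 0 (-1)).foldl
      (fun acc i => acc ++ [PySem.Str.join "." (PySem.List.slice parts none (some i))]) []

-- ===== PORT B =====
-- acc + "." + part is ported as PySem.Str.join "." [acc, part] (exact: the "."-join of two strings).
def family_ancestors_py_alt (family_id : String) : List String :=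
  let parts : List String :=
    ((PySem.Str.split? family_id ".").getD []).filter (fun p => !(p == ""))
  if parts.length ≤ 1 then []
  else
    let acc0 := PySem.List.pyGetD parts 0 ""
    let st := (PySem.List.slice parts (some 1) (some (-1))).foldl
      (fun (st : String × List String) part =>
        let acc := PySem.Str.join "." [st.1, part]
        (acc, st.2 ++ [acc]))
      (acc0, [acc0])
    st.2.reverse

-- ===== PRECONDITION & SPEC =====
def Spec_family_ancestors_py (family_id : String) (out : List String) : Prop := out = family_ancestors_py_alt family_id
instance (family_id : String) (out : List String) : Decidable (Spec_family_ancestors_py family_id out) := by unfold Spec_family_ancestors_py; infer_instance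

-- ===== CLAIM (what is proved, stated in full; the proofs are below) =====
def Claim_equal_family_ancestors_py : Prop := ∀ (family_id : String), Dom_family_ancestors_py family_id → Spec_family_ancestors_py family_id (family_ancestors_py family_id)

-- ===== LEMMAS AND PROOFS =====

theorem pv_foldl_map {α β : Type} (l : List α) (f : α → β) (init : List β) :
    l.foldl (fun a i => a ++ [f i]) init = init ++ l.map f := by
  induction l generalizing init with
  | nil => simp
  | cons x xs ih => simp [List.foldl, ih]

theorem pv_chars_join_snoc (sep : List Char) (l : List (List Char)) (x : List Char) (h : l ≠ []) :
    PySem.Chars.join sep (l ++ [x]) = PySem.Chars.join sep l ++ sep ++ x := by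
  induction l with
  | nil => simp at h
  | cons a as ih =>
    cases as with
    | nil => simp [PySem.Chars.join_cons_cons, PySem.Chars.join_singleton]
    | cons b bs =>
      rw [List.cons_append, show (b :: bs) ++ [x] = b :: (bs ++ [x]) by simp,
          PySem.Chars.join_cons_cons]
      rw [show PySem.Chars.join sep (b :: (bs ++ [x])) = PySem.Chars.join sep ((b :: bs) ++ [x]) by simp,
          ih (by simp), PySem.Chars.join_cons_cons]
      simp

theorem pv_join_singleton (s : String) : PySem.Str.join "." [s] = s := by
  rw [← String.toList_inj, PySem.Str.toList_join]
  simp [PySem.Chars.join_singleton]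

theorem pv_join_snoc (l : List String) (x : String) (h : l ≠ []) :
    PySem.Str.join "." (l ++ [x]) = PySem.Str.join "." [PySem.Str.join "." l, x] := by
  rw [← String.toList_inj, PySem.Str.toList_join, PySem.Str.toList_join]
  rw [show (l ++ [x]).map String.toList = l.map String.toList ++ [x.toList] by simp]
  rw [pv_chars_join_snoc _ _ _ (by simpa using h)]
  rw [show [PySem.Str.join "." l, x].map String.toList
        = [(PySem.Str.join "." l).toList, x.toList] by simp]
  rw [PySem.Chars.join_cons_cons, PySem.Chars.join_singleton, PySem.Str.toList_join]

theorem pv_fold_spec (mid : List String) (pref : List String) (hp : pref ≠ []) (out : List String) :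
    (mid.foldl
      (fun (st : String × List String) part =>
        let acc := PySem.Str.join "." [st.1, part]
        (acc, st.2 ++ [acc]))
      (PySem.Str.join "." pref, out)).2
    = out ++ (List.range mid.length).map
        (fun k => PySem.Str.join "." (pref ++ mid.take (k + 1))) := by
  induction mid generalizing pref out with
  | nil => simp
  | cons x xs ih =>
    simp only [List.foldl]
    rw [show PySem.Str.join "." [PySem.Str.join "." pref, x]
          = PySem.Str.join "." (pref ++ [x]) from (pv_join_snoc pref x hp).symm]
    rw [ih (pref ++ [x]) (by simp) (out ++ [PySem.Str.join "." (pref ++ [x])])]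
    rw [List.length_cons, List.range_succ_eq_map, List.map_cons, List.map_map]
    simp [Function.comp, List.append_assoc]

theorem pv_slice_mid (p0 r0 : String) (rs : List String) :
    PySem.List.slice (p0 :: r0 :: rs) (some 1) (some (-1)) = (r0 :: rs).dropLast := by
  simp [PySem.List.slice, PySem.List.clampIdx, List.dropLast_eq_take]
  split_ifs with h
  · omega
  · omega

theorem pv_core (parts : List String) :
    (if parts.length ≤ 1 then ([] : List String)
     else
       (PySem.List.pyRange ((parts.length : Int) - 1) 0 (-1)).foldl
         (fun acc i => acc ++ [PySem.Str.join "." (PySem.List.slice parts none (some i))]) [])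
    =
    (if parts.length ≤ 1 then ([] : List String)
     else
       let acc0 := PySem.List.pyGetD parts 0 ""
       let st := (PySem.List.slice parts (some 1) (some (-1))).foldl
         (fun (st : String × List String) part =>
           let acc := PySem.Str.join "." [st.1, part]
           (acc, st.2 ++ [acc]))
         (acc0, [acc0])
       st.2.reverse) := by
  by_cases h : parts.length ≤ 1
  · simp [h]
  · rw [if_neg h, if_neg h]
    obtain ⟨p0, r0, rs, rfl⟩ : ∃ p0 r0 rs, parts = p0 :: r0 :: rs := by
      cases parts with
      | nil => simp at h
      | cons a t =>
        cases t with
        | nil => simp at h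
        | cons b u => exact ⟨a, b, u, rfl⟩
    have hR : PySem.List.pyRange (((p0 :: r0 :: rs).length : Int) - 1) 0 (-1)
        = (PySem.List.pyRange 1 ((p0 :: r0 :: rs).length : Int) 1).reverse := by
      rw [PySem.List.pyRange_neg_one_eq_reverse]; norm_num
    rw [hR, pv_foldl_map, List.nil_append, List.map_reverse]
    -- RHS
    have hget : PySem.List.pyGetD (p0 :: r0 :: rs) 0 "" = p0 := by
      simp [PySem.List.pyGetD]
    rw [pv_slice_mid, hget]
    dsimp only
    rw [show (p0, [p0]) = (PySem.Str.join "." [p0], [p0]) by rw [pv_join_singleton]]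
    rw [pv_fold_spec _ [p0] (by simp) [p0]]
    congr 1
    have hlen : ((((p0 :: r0 :: rs).length : Int)) - 1).toNat = rs.length + 1 := by
      simp
    rw [PySem.List.pyRange_one, List.map_map, hlen, List.range_succ_eq_map,
        List.map_cons, List.map_map]
    have hmidlen : (r0 :: rs).dropLast.length = rs.length := by simp
    rw [hmidlen]
    simp only [Function.comp_def]
    rw [List.cons_append, List.nil_append]
    refine List.cons_eq_cons.mpr
      ⟨by rw [show (1 : Int) + ((0 : Nat) : Int) = 1 by norm_num,
              PySem.List.slice_to _ (by norm_num : (0:Int) ≤ 1)]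
          simp [pv_join_singleton], ?_⟩
    apply List.map_congr_left
    intro k hk
    have hk' : k < rs.length := List.mem_range.mp hk
    simp only [Nat.succ_eq_add_one]
    have hidx : (1 : Int) + ((k + 1 : Nat) : Int) = ((k + 2 : Nat) : Int) := by push_cast; ring
    rw [hidx, PySem.List.slice_to_natCast]
    have htake : (p0 :: r0 :: rs).take (k + 2) = p0 :: (r0 :: rs).take (k + 1) := by
      simp [List.take]
    have hdrop : (r0 :: rs).dropLast.take (k + 1) = (r0 :: rs).take (k + 1) := by
      rw [List.dropLast_eq_take, List.take_take]
      congr 1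
      simp
      omega
    rw [htake, hdrop]
    simp
-- ===== VERDICT (by name: the statement is the Claim_ definition above) =====
theorem family_ancestors_py_spec : Claim_equal_family_ancestors_py := by
  intro fid _
  show family_ancestors_py fid = family_ancestors_py_alt fid
  unfold family_ancestors_py family_ancestors_py_alt
  exact pv_core _
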